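-- pv_equiv track=rewrite | github.com/priyadarshiajitav1990/my-tools-in-progress | APIGEE2KONGMIGRATIONTOOL/scripts/duplicate_plugin_handler.py | find_duplicate_plugins
-- ===== SOURCE A (Python) =====
-- def find_duplicate_plugins(plugin_list):
--     seen = {}
--     duplicates = []
--     for plugin in plugin_list:
--         name = plugin.get('name')
--         if name:
--             if name in seen:
--                 duplicates.append((name, seen[name], plugin))
--             else:
--                 seen[name] = plugin
--     return duplicates
-- ===== SOURCE B (Python) =====
-- def find_duplicate_plugins(plugin_list):
--     # pass 1: map each truthy name to its first occurrence (index, plugin)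
--     first = {}
--     for i, plugin in enumerate(plugin_list):
--         name = plugin.get('name')
--         if name:
--             if name not in first:
--                 first[name] = (i, plugin)
--     # pass 2: emit every non-first occurrence in encounter order
--     duplicates = []
--     for i, plugin in enumerate(plugin_list):
--         name = plugin.get('name')
--         if name:
--             fi, fp = first[name]
--             if fi != i:
--                 duplicates.append((name, fp, plugin))
--     return duplicates
-- ===== Notes on version B (the rewrite author's own statement) =====
-- stated objective: alternative
-- what changed: Replaces A's single interleaved pass maintaining a growing seen-dict with two differently-shaped passes: one that precomputes a table mapping each truthy name to its first occurrence (index, plugin), and a second enumerate pass that emits a tuple for every plugin whose name's first index differs from its own index.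
import Mathlib
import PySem

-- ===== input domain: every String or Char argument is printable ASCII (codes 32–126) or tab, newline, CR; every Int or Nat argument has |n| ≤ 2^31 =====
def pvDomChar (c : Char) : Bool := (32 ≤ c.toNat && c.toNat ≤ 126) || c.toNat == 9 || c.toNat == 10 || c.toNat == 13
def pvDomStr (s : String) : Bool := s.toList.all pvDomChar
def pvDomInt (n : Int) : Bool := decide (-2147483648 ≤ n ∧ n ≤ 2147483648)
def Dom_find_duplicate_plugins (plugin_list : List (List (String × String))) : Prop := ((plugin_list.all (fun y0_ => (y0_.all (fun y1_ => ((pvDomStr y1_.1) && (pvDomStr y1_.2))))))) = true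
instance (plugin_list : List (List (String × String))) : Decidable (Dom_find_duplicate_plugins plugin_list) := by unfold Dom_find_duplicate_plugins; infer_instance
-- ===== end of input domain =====

-- B replaces A's single interleaved pass with a precomputed first-occurrence table and a
-- separate emit pass over the enumerated list (alternative decomposition, same cost).


-- plugin.get('name'): first-match lookup in the association list
def pvGetName (p : List (String × String)) : Option String := (PySem.Dict.mk p).get? "name"

-- ===== PORT A =====
-- loop body of A: state = (seen, duplicates)
def pvStepA (st : PySem.Dict String (List (String × String)) × List (String × List (String × String) × List (String × String)))
    (plugin : List (String × String)) :
    PySem.Dict String (List (String × String)) × List (String × List (String × String) × List (String × String)) :=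
  match pvGetName plugin with
  | some n =>
      if n ≠ "" then
        (if st.1.contains n then (st.1, st.2 ++ [(n, st.1.getD n [], plugin)])
         else (st.1.insert n plugin, st.2))
      else st
  | none => st

def find_duplicate_plugins (plugin_list : List (List (String × String))) : List (String × (List (String × String)) × (List (String × String))) :=
  (plugin_list.foldl pvStepA (PySem.Dict.empty, [])).2

-- ===== PORT B =====
-- pass 1 body: record first occurrence (index, plugin) of each truthy name
def pvFirstStep (d : PySem.Dict String (Int × List (String × String))) (ip : Int × List (String × String)) :
    PySem.Dict String (Int × List (String × String)) :=
  match pvGetName ip.2 with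
  | some n => if n ≠ "" then (if d.contains n then d else d.insert n ip) else d
  | none => d

-- pass 2 body: emit every non-first occurrence (the name is always a key of `first`,
-- so Python's first[name] never raises; getD's default is unreachable)
def pvEmitStep (first : PySem.Dict String (Int × List (String × String)))
    (acc : List (String × List (String × String) × List (String × String))) (ip : Int × List (String × String)) :
    List (String × List (String × String) × List (String × String)) :=
  match pvGetName ip.2 with
  | some n =>
      if n ≠ "" then
        (let fp := first.getD n (0, []);
         if fp.1 ≠ ip.1 then acc ++ [(n, fp.2, ip.2)] else acc)
      else acc
  | none => acc

def find_duplicate_plugins_alt (plugin_list : List (List (String × String))) : List (String × (List (String × String)) × (List (String × String))) :=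
  let first := (PySem.List.enumerate plugin_list 0).foldl pvFirstStep PySem.Dict.empty
  (PySem.List.enumerate plugin_list 0).foldl (pvEmitStep first) []

-- ===== PRECONDITION & SPEC =====
def Spec_find_duplicate_plugins (plugin_list : List (List (String × String))) (out : List (String × (List (String × String)) × (List (String × String)))) : Prop := out = find_duplicate_plugins_alt plugin_list
instance (plugin_list : List (List (String × String))) (out : List (String × (List (String × String)) × (List (String × String)))) : Decidable (Spec_find_duplicate_plugins plugin_list out) := by unfold Spec_find_duplicate_plugins; infer_instance

-- ===== CLAIM (what is proved, stated in full; the proofs are below) =====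
def Claim_equal_find_duplicate_plugins : Prop := ∀ (plugin_list : List (List (String × String))), Dom_find_duplicate_plugins plugin_list → Spec_find_duplicate_plugins plugin_list (find_duplicate_plugins plugin_list)

-- ===== LEMMAS AND PROOFS =====

-- pass 1 never overwrites an existing entry
lemma pvFirstStep_mono (T : PySem.Dict String (Int × List (String × String))) (ip : Int × List (String × String))
    (n : String) (v : Int × List (String × String)) (h : T.get? n = some v) :
    (pvFirstStep T ip).get? n = some v := by
  unfold pvFirstStep
  rcases hg : pvGetName ip.2 with _ | m
  · exact h
  · by_cases hc : T.contains m = true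
    · simp [hc, h]
    · simp only [Bool.not_eq_true] at hc
      have hnm : n ≠ m := by
        intro he; subst he
        rw [PySem.Dict.contains_eq_isSome_get?, h] at hc; simp at hc
      by_cases hm : m ≠ "" <;>
        simp [hm, hc, PySem.Dict.get?_insert_of_ne T ip hnm, h]

lemma pvFirstPass_mono (l : List (Int × List (String × String))) (T : PySem.Dict String (Int × List (String × String)))
    (n : String) (v : Int × List (String × String)) (h : T.get? n = some v) :
    (l.foldl pvFirstStep T).get? n = some v := by
  induction l generalizing T with
  | nil => exact h
  | cons ip rest ih => exact ih _ (pvFirstStep_mono T ip n v h)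

-- main invariant: A's remaining loop from state (seen, dups) equals B's emit pass over the
-- enumerated suffix, using the first-occurrence table extended from any T0 matching seen
lemma pvMain (xs : List (List (String × String))) (i0 : Int)
    (seen : PySem.Dict String (List (String × String)))
    (T0 : PySem.Dict String (Int × List (String × String)))
    (dups : List (String × List (String × String) × List (String × String)))
    (h : ∀ n : String,
      (∀ q, seen.get? n = some q → ∃ j : Int, j < i0 ∧ T0.get? n = some (j, q)) ∧
      (seen.get? n = none → T0.get? n = none)) :
    (xs.foldl pvStepA (seen, dups)).2 =
      (PySem.List.enumerate xs i0).foldl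
        (pvEmitStep ((PySem.List.enumerate xs i0).foldl pvFirstStep T0)) dups := by
  induction xs generalizing i0 seen T0 dups with
  | nil => simp [PySem.List.enumerate_nil]
  | cons p rest ih =>
    rw [PySem.List.enumerate_cons]
    simp only [List.foldl_cons]
    rcases hg : pvGetName p with _ | n
    · -- no 'name' key: all three steps skip
      have hA : pvStepA (seen, dups) p = (seen, dups) := by unfold pvStepA; rw [hg]
      have hF : pvFirstStep T0 (i0, p) = T0 := by unfold pvFirstStep; rw [hg]
      have hE : ∀ F acc, pvEmitStep F acc (i0, p) = acc := by
        intro F acc; unfold pvEmitStep; rw [hg]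
      rw [hA, hF, hE]
      exact ih (i0 + 1) seen T0 dups (fun n => ⟨fun q hq => by
        obtain ⟨j, hj, hT⟩ := (h n).1 q hq; exact ⟨j, by omega, hT⟩, (h n).2⟩)
    · by_cases hn : n ≠ ""
      · -- truthy name
        by_cases hs : ∃ q, seen.get? n = some q
        · -- already seen: A emits, B's table keeps first occurrence with index j < i0 ≠ i0
          obtain ⟨q, hq⟩ := hs
          obtain ⟨j, hj, hT⟩ := (h n).1 q hq
          have hcs : seen.contains n = true := by
            rw [PySem.Dict.contains_eq_isSome_get?, hq]; rfl
          have hcT : T0.contains n = true := by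
            rw [PySem.Dict.contains_eq_isSome_get?, hT]; rfl
          have hA : pvStepA (seen, dups) p = (seen, dups ++ [(n, q, p)]) := by
            unfold pvStepA
            rw [hg]
            have hgd : seen.getD n [] = q := by
              rw [PySem.Dict.getD_eq_get?_getD, hq]; rfl
            simp [hn, hcs, hgd]
          have hF : pvFirstStep T0 (i0, p) = T0 := by
            unfold pvFirstStep; rw [hg]; simp [hn, hcT]
          have hFull : ((PySem.List.enumerate rest (i0 + 1)).foldl pvFirstStep T0).get? n = some (j, q) :=
            pvFirstPass_mono _ _ _ _ hT
          have hE : ∀ acc, pvEmitStep ((PySem.List.enumerate rest (i0 + 1)).foldl pvFirstStep T0) acc (i0, p)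
              = acc ++ [(n, q, p)] := by
            intro acc
            unfold pvEmitStep
            rw [hg]
            have hgd : ((PySem.List.enumerate rest (i0 + 1)).foldl pvFirstStep T0).getD n (0, []) = (j, q) := by
              rw [PySem.Dict.getD_eq_get?_getD, hFull]; rfl
            simp [hn, hgd, show j ≠ i0 by omega]
          rw [hA, hF, hE]
          exact ih (i0 + 1) seen T0 (dups ++ [(n, q, p)]) (fun m => ⟨fun q' hq' => by
            obtain ⟨j', hj', hT'⟩ := (h m).1 q' hq'; exact ⟨j', by omega, hT'⟩, (h m).2⟩)
        · -- first occurrence: A inserts into seen, B's pass 1 inserts (i0, p); no emit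
          have hq : seen.get? n = none := by
            cases hv : seen.get? n with
            | none => rfl
            | some v => exact absurd ⟨v, hv⟩ hs
          have hT : T0.get? n = none := (h n).2 hq
          have hcs : seen.contains n = false := by
            rw [PySem.Dict.contains_eq_isSome_get?, hq]; rfl
          have hcT : T0.contains n = false := by
            rw [PySem.Dict.contains_eq_isSome_get?, hT]; rfl
          have hA : pvStepA (seen, dups) p = (seen.insert n p, dups) := by
            unfold pvStepA; rw [hg]; simp [hn, hcs]
          have hF : pvFirstStep T0 (i0, p) = T0.insert n (i0, p) := by
            unfold pvFirstStep; rw [hg]; simp [hn, hcT]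
          have hFull : ((PySem.List.enumerate rest (i0 + 1)).foldl pvFirstStep (T0.insert n (i0, p))).get? n
              = some (i0, p) :=
            pvFirstPass_mono _ _ _ _ (PySem.Dict.get?_insert_self T0 n (i0, p))
          have hE : ∀ acc, pvEmitStep ((PySem.List.enumerate rest (i0 + 1)).foldl pvFirstStep (T0.insert n (i0, p))) acc (i0, p) = acc := by
            intro acc
            unfold pvEmitStep
            rw [hg]
            have hgd : ((PySem.List.enumerate rest (i0 + 1)).foldl pvFirstStep (T0.insert n (i0, p))).getD n (0, []) = (i0, p) := by
              rw [PySem.Dict.getD_eq_get?_getD, hFull]; rfl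
            simp [hn, hgd]
          rw [hA, hF, hE]
          exact ih (i0 + 1) (seen.insert n p) (T0.insert n (i0, p)) dups (fun m => by
            by_cases hm : m = n
            · subst hm
              refine ⟨fun q' hq' => ?_, fun hnone => ?_⟩
              · rw [PySem.Dict.get?_insert_self] at hq'
                exact ⟨i0, by omega, by rw [PySem.Dict.get?_insert_self]; cases hq'; rfl⟩
              · rw [PySem.Dict.get?_insert_self] at hnone; cases hnone
            · refine ⟨fun q' hq' => ?_, fun hnone => ?_⟩
              · rw [PySem.Dict.get?_insert_of_ne _ _ hm] at hq'
                obtain ⟨j', hj', hT'⟩ := (h m).1 q' hq'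
                exact ⟨j', by omega, by rw [PySem.Dict.get?_insert_of_ne _ _ hm]; exact hT'⟩
              · rw [PySem.Dict.get?_insert_of_ne _ _ hm] at hnone
                rw [PySem.Dict.get?_insert_of_ne _ _ hm]
                exact (h m).2 hnone)
      · -- falsy name "": all three steps skip
        simp only [ne_eq, not_not] at hn
        have hA : pvStepA (seen, dups) p = (seen, dups) := by
          unfold pvStepA; rw [hg]; simp [hn]
        have hF : pvFirstStep T0 (i0, p) = T0 := by
          unfold pvFirstStep; rw [hg]; simp [hn]
        have hE : ∀ F acc, pvEmitStep F acc (i0, p) = acc := by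
          intro F acc; unfold pvEmitStep; rw [hg]; simp [hn]
        rw [hA, hF, hE]
        exact ih (i0 + 1) seen T0 dups (fun m => ⟨fun q hq => by
          obtain ⟨j, hj, hT⟩ := (h m).1 q hq; exact ⟨j, by omega, hT⟩, (h m).2⟩)

-- ===== VERDICT (by name: the statement is the Claim_ definition above) =====
theorem find_duplicate_plugins_spec : Claim_equal_find_duplicate_plugins := by
  intro plugin_list _
  unfold Spec_find_duplicate_plugins find_duplicate_plugins find_duplicate_plugins_alt
  exact pvMain plugin_list 0 PySem.Dict.empty PySem.Dict.empty []
    (fun n => ⟨fun q hq => by simp [PySem.Dict.get?_empty] at hq, fun _ => by simp [PySem.Dict.get?_empty]⟩)
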